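-- pv_equiv track=rewrite | github.com/Michalmaciej/Sorting_Algorithms_Visualization | radix_sort.py | _counting_sort_gen
-- ===== SOURCE A (Python) =====
-- def _counting_sort_gen(nums, exp):
--     n = len(nums)
--     output = [0] * n
--     count = [0] * 10
--
--     for i in range(n):
--         index = nums[i] // exp
--         count[index % 10] += 1
--         yield (nums.copy(), i, -1, (0, 0))
--
--     for i in range(1, 10):
--         count[i] += count[i - 1]
--
--     i = n - 1
--     while i >= 0:
--         index = nums[i] // exp
--         dest = count[index % 10] - 1
--         output[dest] = nums[i]
--         count[index % 10] -= 1
--         i -= 1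
--
--     for i in range(n):
--         nums[i] = output[i]
--         yield (nums.copy(), i, -1, (0, 0))
-- ===== SOURCE B (Python) =====
-- def _counting_sort_gen(nums, exp):
--     # Bucket distribution instead of count/prefix-sum/reverse-fill; same yields, same in-place writes.
--     n = len(nums)
--     buckets = [[] for _ in range(10)]
--     for i in range(n):
--         buckets[(nums[i] // exp) % 10].append(nums[i])
--         yield (nums.copy(), i, -1, (0, 0))
--     output = [v for b in buckets for v in b]
--     for i in range(n):
--         nums[i] = output[i]
--         yield (nums.copy(), i, -1, (0, 0))
-- ===== Notes on version B (the rewrite author's own statement) =====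
-- stated objective: simpler
-- what changed: Replaces the count array, the cumulative-sum pass and the reverse-placement while-loop with ten buckets filled by forward appends and concatenated in digit order (stable, so the same output); the two yield loops are kept.
import Mathlib
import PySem

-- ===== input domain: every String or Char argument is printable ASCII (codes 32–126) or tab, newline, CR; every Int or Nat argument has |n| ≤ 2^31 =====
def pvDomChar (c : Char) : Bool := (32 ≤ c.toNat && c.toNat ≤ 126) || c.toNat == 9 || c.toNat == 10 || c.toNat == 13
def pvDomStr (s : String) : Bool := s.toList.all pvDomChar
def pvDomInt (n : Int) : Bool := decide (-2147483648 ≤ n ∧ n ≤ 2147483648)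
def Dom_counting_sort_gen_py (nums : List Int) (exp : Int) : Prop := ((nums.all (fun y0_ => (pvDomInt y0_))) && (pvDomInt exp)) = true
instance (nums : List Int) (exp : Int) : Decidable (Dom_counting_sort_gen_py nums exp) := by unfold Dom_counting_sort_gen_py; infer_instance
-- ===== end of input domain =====

-- B replaces counting sort's count/prefix-sum/reverse-fill phases with ten buckets concatenated
-- in digit order (stable, same result); both versions mutate `nums` in place identically, and the
-- equivalence proved here is about the returned (yielded) sequence.


-- ===== PORT A =====
-- `(nums[i] // exp) % 10`, the digit both Pythons extract
def dg (exp x : Int) : Int := PySem.Int.mod (PySem.Int.floordiv x exp) 10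

-- the identical second `for i in range(n): nums[i] = output[i]; yield …` loop of both Pythons
def csPhase2 (nums output : List Int) : List Int × List (List Int × Int × Int × (Int × Int)) :=
  (PySem.List.pyRange 0 (nums.length : Int)).foldl
    (fun st i =>
      let cur := st.1.set i.toNat (PySem.List.pyGetD output i 0)
      (cur, st.2 ++ [(cur, i, -1, (0, 0))]))
    (nums, [])

-- A's `while i >= 0` placement loop; k counts the remaining iterations, the current index is k-1.
-- `.toNat` on the two write indices is exact: in every run count[d]-1 ≥ 0 and d = _%10 ∈ [0,10).
def csFillA (nums : List Int) (exp : Int) : Nat → List Int → List Int → List Int × List Int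
  | 0, count, output => (count, output)
  | k+1, count, output =>
    let d := dg exp (PySem.List.pyGetD nums (k : Int) 0)
    let c := PySem.List.pyGetD count d 0
    csFillA nums exp k (count.set d.toNat (c - 1)) (output.set (c - 1).toNat (PySem.List.pyGetD nums (k : Int) 0))

def counting_sort_gen_py (nums : List Int) (exp : Int) : List (List Int × Int × Int × (Int × Int)) :=
  let n := nums.length
  let step1 := (PySem.List.pyRange 0 (n : Int)).foldl
    (fun (st : List Int × List (List Int × Int × Int × (Int × Int))) i =>
      (st.1.set (dg exp (PySem.List.pyGetD nums i 0)).toNat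
         (PySem.List.pyGetD st.1 (dg exp (PySem.List.pyGetD nums i 0)) 0 + 1),
       st.2 ++ [(nums, i, -1, (0, 0))]))
    (List.replicate 10 0, [])
  let count2 := (PySem.List.pyRange 1 10).foldl
    (fun c i => c.set i.toNat (PySem.List.pyGetD c i 0 + PySem.List.pyGetD c (i - 1) 0)) step1.1
  let output := (csFillA nums exp n count2 (List.replicate n 0)).2
  step1.2 ++ (csPhase2 nums output).2

-- ===== PORT B =====
def counting_sort_gen_py_alt (nums : List Int) (exp : Int) : List (List Int × Int × Int × (Int × Int)) :=
  let n := nums.length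
  let step1 := (PySem.List.pyRange 0 (n : Int)).foldl
    (fun (st : List (List Int) × List (List Int × Int × Int × (Int × Int))) i =>
      (st.1.set (dg exp (PySem.List.pyGetD nums i 0)).toNat
         (PySem.List.pyGetD st.1 (dg exp (PySem.List.pyGetD nums i 0)) [] ++ [PySem.List.pyGetD nums i 0]),
       st.2 ++ [(nums, i, -1, (0, 0))]))
    (List.replicate 10 [], [])
  let output := step1.1.flatten
  step1.2 ++ (csPhase2 nums output).2

-- ===== PRECONDITION & SPEC =====
-- Pre_ excludes exactly the ZeroDivisionError inputs: exp = 0 with a nonempty list (both Pythons raise there).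
def Pre_counting_sort_gen_py (nums : List Int) (exp : Int) : Prop := nums = [] ∨ exp ≠ 0
instance (nums : List Int) (exp : Int) : Decidable (Pre_counting_sort_gen_py nums exp) := by unfold Pre_counting_sort_gen_py; infer_instance
def pvWitness_counting_sort_gen_py : List Int × Int := ([170, 45, 75, 90, 802, 24, 2, 66], 1)

def Spec_counting_sort_gen_py (nums : List Int) (exp : Int) (out : List (List Int × Int × Int × (Int × Int))) : Prop := out = counting_sort_gen_py_alt nums exp
instance (nums : List Int) (exp : Int) (out : List (List Int × Int × Int × (Int × Int))) : Decidable (Spec_counting_sort_gen_py nums exp out) := by unfold Spec_counting_sort_gen_py; infer_instance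

-- ===== CLAIM (what is proved, stated in full; the proofs are below) =====
def Claim_equal_counting_sort_gen_py : Prop := ∀ (nums : List Int) (exp : Int), Dom_counting_sort_gen_py nums exp → Pre_counting_sort_gen_py nums exp → Spec_counting_sort_gen_py nums exp (counting_sort_gen_py nums exp)

-- ===== LEMMAS AND PROOFS =====

-- bucket j of l, its size, and the start offset of bucket j in the concatenation
def bktf (e : Int) (l : List Int) (j : Nat) : List Int := l.filter (fun x => dg e x == (j : Int))
def cntd (e : Int) (l : List Int) (j : Nat) : Nat := (bktf e l j).length
def Sf (e : Int) (l : List Int) (j : Nat) : Nat := ∑ t ∈ Finset.range j, cntd e l t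

theorem dg_toNat_lt (e x : Int) : (dg e x).toNat < 10 := by
  have h1 := PySem.Int.mod_nonneg (PySem.Int.floordiv x e) (b := 10) (by norm_num)
  have h2 := PySem.Int.mod_lt (PySem.Int.floordiv x e) (b := 10) (by norm_num)
  simp only [dg]; omega

theorem dg_toNat_cast (e x : Int) : (((dg e x).toNat : Nat) : Int) = dg e x := by
  have h1 := PySem.Int.mod_nonneg (PySem.Int.floordiv x e) (b := 10) (by norm_num)
  simp only [dg]; omega

theorem pyGetD_set {α : Type} (xs : List α) (i j : Nat) (v d : α) (h : i < xs.length) :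
    PySem.List.pyGetD (xs.set i v) (j : Int) d = if i = j then v else PySem.List.pyGetD xs (j : Int) d := by
  rcases eq_or_ne i j with rfl | hne
  · simp [PySem.List.pyGetD_natCast, List.getD_eq_getElem?_getD, List.getElem?_set_self h]
  · simp [PySem.List.pyGetD_natCast, List.getD_eq_getElem?_getD, List.getElem?_set_ne hne, hne]

theorem foldl_set_length {α β : Type} (f : β → Nat) (g : List α → β → α) :
    ∀ (l : List β) (c : List α), (l.foldl (fun c x => c.set (f x) (g c x)) c).length = c.length := by
  intro l; induction l with
  | nil => intro c; rfl
  | cons x l ih => intro c; rw [List.foldl_cons, ih]; exact List.length_set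

theorem bktf_cons (e : Int) (x : Int) (l : List Int) (j : Nat) :
    bktf e (x :: l) j = (if (dg e x).toNat = j then [x] else []) ++ bktf e l j := by
  have := dg_toNat_cast e x
  simp only [bktf, List.filter_cons, beq_iff_eq]
  rcases eq_or_ne (dg e x) ((j : Nat) : Int) with h1 | h1
  · rw [if_pos h1, if_pos (show (dg e x).toNat = j by omega)]
    rfl
  · rw [if_neg h1, if_neg (show ¬(dg e x).toNat = j by omega), List.nil_append]

theorem bktf_append (e y : Int) (l : List Int) (j : Nat) :
    bktf e (l ++ [y]) j = bktf e l j ++ (if (dg e y).toNat = j then [y] else []) := by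
  have hc := dg_toNat_cast e y
  simp only [bktf, List.filter_append, List.filter_cons, List.filter_nil, beq_iff_eq]
  rcases eq_or_ne (dg e y) ((j : Nat) : Int) with h1 | h1
  · rw [if_pos h1, if_pos (show (dg e y).toNat = j by omega)]
  · rw [if_neg h1, if_neg (show ¬(dg e y).toNat = j by omega)]

theorem countA_getD (e : Int) (l : List Int) (c0 : List Int) (h : c0.length = 10) (j : Nat) :
    PySem.List.pyGetD
      (l.foldl (fun c x => c.set (dg e x).toNat (PySem.List.pyGetD c (dg e x) 0 + 1)) c0) (j : Int) 0
      = PySem.List.pyGetD c0 (j : Int) 0 + (cntd e l j : Int) := by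
  induction l generalizing c0 with
  | nil => simp [cntd, bktf]
  | cons x l ih =>
    rw [List.foldl_cons, ih _ (by simp [h])]
    have hlt : (dg e x).toNat < c0.length := by rw [h]; exact dg_toNat_lt e x
    rw [pyGetD_set c0 _ j _ 0 hlt]
    have hcnt : cntd e (x :: l) j = (if (dg e x).toNat = j then 1 else 0) + cntd e l j := by
      simp only [cntd, bktf_cons]; split_ifs <;> simp [Nat.add_comm]
    rw [hcnt]
    split_ifs with hd
    · have : dg e x = (j : Int) := by rw [← dg_toNat_cast e x, hd]
      rw [← this]; push_cast; ring
    · push_cast; ring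

theorem bucketB_getD (e : Int) (l : List Int) (b0 : List (List Int)) (h : b0.length = 10) (j : Nat) :
    PySem.List.pyGetD
      (l.foldl (fun b x => b.set (dg e x).toNat (PySem.List.pyGetD b (dg e x) [] ++ [x])) b0) (j : Int) []
      = PySem.List.pyGetD b0 (j : Int) [] ++ bktf e l j := by
  induction l generalizing b0 with
  | nil => simp [bktf]
  | cons x l ih =>
    rw [List.foldl_cons, ih _ (by simp [h])]
    have hlt : (dg e x).toNat < b0.length := by rw [h]; exact dg_toNat_lt e x
    rw [pyGetD_set b0 _ j _ [] hlt, bktf_cons]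
    split_ifs with hd
    · have : dg e x = (j : Int) := by rw [← dg_toNat_cast e x, hd]
      rw [← this]; simp
    · simp

theorem cum_getD (c1 : List Int) (h : c1.length = 10) :
    ∀ m : Nat, m ≤ 10 →
      ((PySem.List.pyRange 1 (m : Int)).foldl
          (fun c i => c.set i.toNat (PySem.List.pyGetD c i 0 + PySem.List.pyGetD c (i - 1) 0)) c1).length = 10 ∧
      ∀ j : Nat, j < 10 →
        PySem.List.pyGetD
          ((PySem.List.pyRange 1 (m : Int)).foldl
            (fun c i => c.set i.toNat (PySem.List.pyGetD c i 0 + PySem.List.pyGetD c (i - 1) 0)) c1) (j : Int) 0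
          = if j < m then ∑ t ∈ Finset.range (j + 1), PySem.List.pyGetD c1 (t : Int) 0
            else PySem.List.pyGetD c1 (j : Int) 0 := by
  intro m
  induction m with
  | zero =>
    intro _
    have hnil : PySem.List.pyRange 1 ((0 : Nat) : Int) = [] :=
      PySem.List.pyRange_one_eq_nil (by simp)
    rw [hnil]
    exact ⟨h, fun j hj => by simp⟩
  | succ m ih =>
    intro hm
    rcases Nat.eq_zero_or_pos m with rfl | hmpos
    · have hnil : PySem.List.pyRange 1 ((1 : Nat) : Int) = [] :=
        PySem.List.pyRange_one_eq_nil (by simp)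
      rw [hnil]
      refine ⟨h, fun j hj => ?_⟩
      rcases Nat.eq_zero_or_pos j with rfl | hjpos
      · rw [List.foldl_nil, if_pos (by omega), Finset.sum_range_one]
      · rw [List.foldl_nil, if_neg (by omega)]
    · obtain ⟨hrl, hrv⟩ := ih (by omega)
      have hlast : PySem.List.pyRange ((m : Nat) : Int) ((m + 1 : Nat) : Int) = [((m : Nat) : Int)] := by
        rw [PySem.List.pyRange_one_cons (by push_cast; omega),
            PySem.List.pyRange_one_eq_nil (by push_cast; omega)]
      have hsplit : PySem.List.pyRange 1 ((m + 1 : Nat) : Int)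
          = PySem.List.pyRange 1 ((m : Nat) : Int) ++ [((m : Nat) : Int)] := by
        rw [PySem.List.pyRange_one_append 1 ((m : Nat) : Int) ((m + 1 : Nat) : Int)
              (by exact_mod_cast hmpos) (by push_cast; omega), hlast]
      rw [hsplit, List.foldl_append, List.foldl_cons, List.foldl_nil]
      set r := (PySem.List.pyRange 1 ((m : Nat) : Int)).foldl
        (fun c i => c.set i.toNat (PySem.List.pyGetD c i 0 + PySem.List.pyGetD c (i - 1) 0)) c1 with hr
      have hmtn : ((m : Nat) : Int).toNat = m := Int.toNat_natCast m
      have hmlt : ((m : Nat) : Int).toNat < r.length := by rw [hrl, hmtn]; omega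
      refine ⟨by rw [List.length_set, hrl], fun j hj => ?_⟩
      rw [hmtn, pyGetD_set r m j _ 0 (by rw [hrl]; omega)]
      have hvm : PySem.List.pyGetD r ((m : Nat) : Int) 0 = PySem.List.pyGetD c1 ((m : Nat) : Int) 0 := by
        rw [hrv m (by omega), if_neg (by omega)]
      have hcast : ((m : Nat) : Int) - 1 = (((m - 1 : Nat)) : Int) := by omega
      have hvm1 : PySem.List.pyGetD r (((m : Nat) : Int) - 1) 0
          = ∑ t ∈ Finset.range m, PySem.List.pyGetD c1 (t : Int) 0 := by
        rw [hcast, hrv (m - 1) (by omega), if_pos (by omega),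
            show m - 1 + 1 = m from by omega]
      rcases eq_or_ne m j with rfl | hd
      · rw [if_pos rfl, if_pos (by omega), hvm, hvm1, Finset.sum_range_succ]
        ring
      · rw [if_neg hd, hrv j hj]
        by_cases hjm : j < m
        · rw [if_pos hjm, if_pos (by omega)]
        · rw [if_neg hjm, if_neg (by omega)]

theorem Sf_succ (e : Int) (l : List Int) (j : Nat) : Sf e l (j + 1) = Sf e l j + cntd e l j :=
  Finset.sum_range_succ _ _

theorem Sf_mono (e : Int) (l : List Int) {j j' : Nat} (h : j ≤ j') : Sf e l j ≤ Sf e l j' :=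
  by
  apply Finset.sum_le_sum_of_subset
  intro t ht
  simp only [Finset.mem_range] at ht ⊢
  omega

theorem Sf_ten (e : Int) (l : List Int) : Sf e l 10 = l.length := by
  induction l with
  | nil => simp [Sf, cntd, bktf]
  | cons x l ih =>
    have hc : ∀ t, cntd e (x :: l) t = (if (dg e x).toNat = t then 1 else 0) + cntd e l t := by
      intro t; simp only [cntd, bktf_cons]; split_ifs <;> simp [Nat.add_comm]
    simp only [Sf] at ih ⊢
    simp only [hc, Finset.sum_add_distrib, ih, Finset.sum_ite_eq, Finset.mem_range]
    rw [if_pos (dg_toNat_lt e x)]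
    simp [Nat.add_comm]

theorem cntd_take_le (e : Int) (l : List Int) (k j : Nat) : cntd e (l.take k) j ≤ cntd e l j :=
  List.Sublist.length_le (List.Sublist.filter _ (List.take_sublist k l))

theorem fill_spec (nums : List Int) (e : Int) :
    ∀ (k : Nat), k ≤ nums.length → ∀ (count output : List Int),
    count.length = 10 → output.length = nums.length →
    (∀ j : Nat, j < 10 →
       PySem.List.pyGetD count (j : Int) 0 = ((Sf e nums j + cntd e (nums.take k) j : Nat) : Int)) →
    (csFillA nums e k count output).2.length = nums.length ∧
    (∀ j : Nat, j < 10 → ∀ i : Nat, i < cntd e (nums.take k) j →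
       (csFillA nums e k count output).2[Sf e nums j + i]? = (bktf e (nums.take k) j)[i]?) ∧
    (∀ p : Nat, p < nums.length →
       (∀ j : Nat, j < 10 → ¬(Sf e nums j ≤ p ∧ p < Sf e nums j + cntd e (nums.take k) j)) →
       (csFillA nums e k count output).2[p]? = output[p]?) := by
  intro k
  induction k with
  | zero =>
    intro _ count output _ ho _
    refine ⟨ho, ?_, fun p _ _ => rfl⟩
    intro j hj i hi
    simp [cntd, bktf] at hi
  | succ k ih =>
    intro hk count output hclen holen hcv
    have hklt : k < nums.length := by omega
    have hx : PySem.List.pyGetD nums (k : Int) 0 = nums[k] := by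
      rw [PySem.List.pyGetD_natCast, List.getD_eq_getElem nums 0 hklt]
    set x := nums[k] with hxdef
    have htake : nums.take (k + 1) = nums.take k ++ [x] := List.take_succ_eq_append_getElem hklt
    set j0 := (dg e x).toNat with hj0def
    have hj0 : j0 < 10 := dg_toNat_lt e x
    have hj0c : ((j0 : Nat) : Int) = dg e x := dg_toNat_cast e x
    have hcnt_succ : ∀ j : Nat, cntd e (nums.take (k + 1)) j
        = cntd e (nums.take k) j + (if j0 = j then 1 else 0) := by
      intro j; rw [htake]; simp only [cntd, bktf_append, List.length_append]
      split_ifs <;> simp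
    set q := Sf e nums j0 + cntd e (nums.take k) j0 with hqdef
    have hcq : PySem.List.pyGetD count (dg e x) 0 = ((q + 1 : Nat) : Int) := by
      have h1 : Sf e nums j0 + cntd e (nums.take (k + 1)) j0 = q + 1 := by
        rw [hcnt_succ j0, if_pos rfl]; omega
      rw [← hj0c, hcv j0 hj0, h1]
    have hstep : csFillA nums e (k + 1) count output
        = csFillA nums e k (count.set j0 ((q : Nat) : Int))
            (output.set q x) := by
      simp only [csFillA, hx, ← hj0def]
      have hvals : PySem.List.pyGetD count (dg e x) 0 - 1 = ((q : Nat) : Int) := by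
        rw [hcq]; push_cast; ring
      rw [hvals, Int.toNat_natCast]
    have hcv' : ∀ j : Nat, j < 10 →
        PySem.List.pyGetD (count.set j0 ((q : Nat) : Int)) (j : Int) 0
          = ((Sf e nums j + cntd e (nums.take k) j : Nat) : Int) := by
      intro j hj
      rw [pyGetD_set count j0 j _ 0 (by rw [hclen]; exact hj0)]
      rcases eq_or_ne j0 j with rfl | hne
      · rw [if_pos rfl]
      · rw [if_neg hne, hcv j hj, hcnt_succ j, if_neg hne]; norm_num
    obtain ⟨hlen, hA, hB⟩ := ih (by omega) (count.set j0 ((q : Nat) : Int)) (output.set q x)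
      (by rw [List.length_set, hclen]) (by rw [List.length_set, holen]) hcv'
    have hcnt_le1 : cntd e (nums.take (k + 1)) j0 ≤ cntd e nums j0 := cntd_take_le e nums (k + 1) j0
    have hS1 : Sf e nums j0 + cntd e nums j0 = Sf e nums (j0 + 1) := (Sf_succ e nums j0).symm
    have hS2 : Sf e nums (j0 + 1) ≤ Sf e nums 10 := Sf_mono e nums (by omega)
    have hS3 := Sf_ten e nums
    have hcs0 := hcnt_succ j0
    rw [if_pos rfl] at hcs0
    have hql : q < nums.length := by omega
    rw [hstep]
    refine ⟨hlen, ?_, ?_⟩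
    · intro j hj i hi
      by_cases hcase : j0 = j ∧ i = cntd e (nums.take k) j
      · obtain ⟨rfl, rfl⟩ := hcase
        have hreg : ∀ j' : Nat, j' < 10 →
            ¬(Sf e nums j' ≤ q ∧ q < Sf e nums j' + cntd e (nums.take k) j') := by
          intro j' hj' hcon
          rcases lt_trichotomy j' j0 with hlt | rfl | hgt
          · have h1 : cntd e (nums.take k) j' ≤ cntd e nums j' := cntd_take_le e nums k j'
            have h2 : Sf e nums j' + cntd e nums j' = Sf e nums (j' + 1) := (Sf_succ e nums j').symm
            have h3 : Sf e nums (j' + 1) ≤ Sf e nums j0 := Sf_mono e nums (by omega)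
            omega
          · omega
          · have h2 : Sf e nums (j0 + 1) ≤ Sf e nums j' := Sf_mono e nums (by omega)
            omega
        rw [hB q hql hreg, List.getElem?_set_self (by rw [holen]; exact hql)]
        rw [htake, bktf_append, if_pos rfl,
            show cntd e (nums.take k) j0 = (bktf e (nums.take k) j0).length from rfl,
            List.getElem?_concat_length]
      · have hi' : i < cntd e (nums.take k) j := by
          have h1 := hcnt_succ j
          by_cases hj0j : j0 = j
          · subst hj0j
            have h2 : i ≠ cntd e (nums.take k) j0 := fun h => hcase ⟨rfl, h⟩
            omega
          · rw [h1, if_neg hj0j] at hi; omega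
        rw [hA j hj i hi', htake, bktf_append]
        by_cases hj0j : j0 = j
        · rw [if_pos hj0j,
              List.getElem?_append_left (show i < (bktf e (nums.take k) j).length from hi')]
        · rw [if_neg hj0j, List.append_nil]
    · intro p hp hpreg
      have hpreg' : ∀ j : Nat, j < 10 →
          ¬(Sf e nums j ≤ p ∧ p < Sf e nums j + cntd e (nums.take k) j) := by
        intro j hj hcon
        have h1 := hcnt_succ j
        have h2 : cntd e (nums.take k) j ≤ cntd e (nums.take (k + 1)) j := by
          rw [h1]; split_ifs <;> omega
        exact hpreg j hj ⟨hcon.1, by omega⟩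
      have hq_ne : q ≠ p := by
        intro hqp
        exact hpreg j0 hj0 ⟨by omega, by omega⟩
      rw [hB p hp hpreg', List.getElem?_set_ne hq_ne]

theorem exists_region (e : Int) (l : List Int) :
    ∀ (m p : Nat), p < Sf e l m → ∃ j : Nat, j < m ∧ Sf e l j ≤ p ∧ p < Sf e l (j + 1) := by
  intro m; induction m with
  | zero => intro p hp; simp [Sf] at hp
  | succ m ih =>
    intro p hp
    by_cases h : p < Sf e l m
    · obtain ⟨j, h1, h2, h3⟩ := ih p h; exact ⟨j, by omega, h2, h3⟩
    · exact ⟨m, by omega, by omega, hp⟩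

theorem flatten_getElem? {α : Type} :
    ∀ (L : List (List α)) (j : Nat), j < L.length → ∀ (i : Nat), i < (L.getD j []).length →
      L.flatten[(∑ t ∈ Finset.range j, (L.getD t []).length) + i]? = (L.getD j [])[i]? := by
  intro L
  induction L with
  | nil => intro j hj; simp at hj
  | cons a rest ih =>
    intro j hj i hi
    cases j with
    | zero =>
      simp only [Finset.range_zero, Finset.sum_empty, List.getD_cons_zero] at hi ⊢
      rw [List.flatten_cons, Nat.zero_add, List.getElem?_append_left hi]
    | succ j =>
      have hsum : (∑ t ∈ Finset.range (j + 1), ((a :: rest).getD t []).length)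
          = a.length + ∑ t ∈ Finset.range j, (rest.getD t []).length := by
        rw [Finset.sum_range_succ']
        simp [Nat.add_comm]
      rw [List.getD_cons_succ] at hi ⊢
      rw [List.flatten_cons, hsum, Nat.add_assoc, List.getElem?_append_right (by omega)]
      have harith : a.length + (∑ t ∈ Finset.range j, (rest.getD t []).length + i) - a.length
          = ∑ t ∈ Finset.range j, (rest.getD t []).length + i := by omega
      rw [harith]
      exact ih j (by simpa using hj) i hi

theorem outputA_eq (nums : List Int) (e : Int) :
    (csFillA nums e nums.length
      ((PySem.List.pyRange 1 10).foldl
        (fun c i => c.set i.toNat (PySem.List.pyGetD c i 0 + PySem.List.pyGetD c (i - 1) 0))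
        (nums.foldl (fun c x => c.set (dg e x).toNat (PySem.List.pyGetD c (dg e x) 0 + 1))
          (List.replicate 10 (0 : Int))))
      (List.replicate nums.length 0)).2
    = ((List.range 10).map (bktf e nums)).flatten := by
  have hc1len : (nums.foldl (fun c x => c.set (dg e x).toNat (PySem.List.pyGetD c (dg e x) 0 + 1))
      (List.replicate 10 (0 : Int))).length = 10 := by
    rw [foldl_set_length (fun x => (dg e x).toNat) (fun c x => PySem.List.pyGetD c (dg e x) 0 + 1)]
    simp
  have hc1v : ∀ j : Nat, j < 10 →
      PySem.List.pyGetD (nums.foldl (fun c x => c.set (dg e x).toNat (PySem.List.pyGetD c (dg e x) 0 + 1))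
        (List.replicate 10 (0 : Int))) (j : Int) 0 = (cntd e nums j : Int) := by
    intro j hj
    rw [countA_getD e nums _ (by simp) j]
    have h0 : PySem.List.pyGetD (List.replicate 10 (0 : Int)) (j : Int) 0 = 0 := by
      rw [PySem.List.pyGetD_natCast, List.getD_eq_getElem _ _ (by simpa using hj),
          List.getElem_replicate]
    rw [h0, zero_add]
  have hten : ((10 : Nat) : Int) = (10 : Int) := by norm_num
  obtain ⟨hc2len, hc2v⟩ := cum_getD
    (nums.foldl (fun c x => c.set (dg e x).toNat (PySem.List.pyGetD c (dg e x) 0 + 1))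
      (List.replicate 10 (0 : Int))) hc1len 10 (le_refl 10)
  rw [hten] at hc2len hc2v
  have hc2v' : ∀ j : Nat, j < 10 →
      PySem.List.pyGetD ((PySem.List.pyRange 1 10).foldl
        (fun c i => c.set i.toNat (PySem.List.pyGetD c i 0 + PySem.List.pyGetD c (i - 1) 0))
        (nums.foldl (fun c x => c.set (dg e x).toNat (PySem.List.pyGetD c (dg e x) 0 + 1))
          (List.replicate 10 (0 : Int)))) (j : Int) 0
      = ((Sf e nums j + cntd e nums j : Nat) : Int) := by
    intro j hj
    rw [hc2v j hj, if_pos hj]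
    rw [Finset.sum_congr rfl (fun t ht => hc1v t (by simp at ht; omega))]
    rw [show (Sf e nums j + cntd e nums j) = Sf e nums (j + 1) from (Sf_succ e nums j).symm]
    simp [Sf]
  obtain ⟨hlen, hA, hB⟩ := fill_spec nums e nums.length (le_refl _) _ (List.replicate nums.length 0)
    hc2len (by simp) (by simpa [List.take_length] using hc2v')
  simp only [List.take_length] at hA
  have hgetD : ∀ t : Nat, t < 10 →
      ((List.range 10).map (bktf e nums)).getD t [] = bktf e nums t := by
    intro t ht
    simp [List.getD_eq_getElem?_getD, ht]
  have htlen : ((List.range 10).map (bktf e nums)).flatten.length = nums.length := by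
    rw [List.length_flatten, List.map_map,
        show nums.length = Sf e nums 10 from (Sf_ten e nums).symm]
    rfl
  apply List.ext_getElem?
  intro p
  by_cases hp : p < nums.length
  · obtain ⟨j, hj, h1, h2⟩ := exists_region e nums 10 p (by rw [Sf_ten]; exact hp)
    rw [Sf_succ] at h2
    have hi : p - Sf e nums j < cntd e nums j := by omega
    have hL := hA j hj (p - Sf e nums j) hi
    rw [show Sf e nums j + (p - Sf e nums j) = p from by omega] at hL
    rw [hL]
    have hflat := flatten_getElem? ((List.range 10).map (bktf e nums)) j (by simpa using hj)
      (p - Sf e nums j) (by rw [hgetD j hj]; exact hi)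
    rw [hgetD j hj] at hflat
    rw [Finset.sum_congr rfl (fun t ht => by rw [hgetD t (by simp at ht; omega)])] at hflat
    rw [show (∑ t ∈ Finset.range j, (bktf e nums t).length) = Sf e nums j from rfl] at hflat
    rw [show Sf e nums j + (p - Sf e nums j) = p from by omega] at hflat
    rw [hflat]
  · rw [List.getElem?_eq_none (by omega), List.getElem?_eq_none (by rw [htlen]; omega)]

theorem bucketsB_eq (nums : List Int) (e : Int) :
    nums.foldl (fun b x => b.set (dg e x).toNat (PySem.List.pyGetD b (dg e x) [] ++ [x]))
      (List.replicate 10 [])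
    = (List.range 10).map (bktf e nums) := by
  have hblen : (nums.foldl (fun b x => b.set (dg e x).toNat (PySem.List.pyGetD b (dg e x) [] ++ [x]))
      (List.replicate 10 ([] : List Int))).length = 10 := by
    rw [foldl_set_length (fun x => (dg e x).toNat)
        (fun b x => PySem.List.pyGetD b (dg e x) [] ++ [x])]
    simp
  apply List.ext_getElem?
  intro p
  by_cases hp : p < 10
  · have hv := bucketB_getD e nums (List.replicate 10 []) (by simp) p
    have h0 : PySem.List.pyGetD (List.replicate 10 ([] : List Int)) (p : Int) [] = [] := by
      rw [PySem.List.pyGetD_natCast, List.getD_eq_getElem _ _ (by simpa using hp),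
          List.getElem_replicate]
    rw [h0, List.nil_append] at hv
    rw [List.getElem?_eq_getElem (by rw [hblen]; exact hp),
        List.getElem?_eq_getElem (by simpa using hp)]
    have hL : (nums.foldl (fun b x => b.set (dg e x).toNat (PySem.List.pyGetD b (dg e x) [] ++ [x]))
        (List.replicate 10 ([] : List Int)))[p]'(by rw [hblen]; exact hp)
        = PySem.List.pyGetD (nums.foldl
            (fun b x => b.set (dg e x).toNat (PySem.List.pyGetD b (dg e x) [] ++ [x]))
            (List.replicate 10 ([] : List Int))) (p : Int) [] := by
      rw [PySem.List.pyGetD_natCast, List.getD_eq_getElem _ _ (by rw [hblen]; exact hp)]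
    rw [Option.some_inj, hL, hv]
    simp
  · rw [List.getElem?_eq_none (by rw [hblen]; omega),
        List.getElem?_eq_none (by simp; omega)]

theorem portA_eq (nums : List Int) (e : Int) :
    counting_sort_gen_py nums e
      = ((PySem.List.pyRange 0 (nums.length : Int)).map (fun i => (nums, i, -1, ((0 : Int), (0 : Int)))))
        ++ (csPhase2 nums (((List.range 10).map (bktf e nums)).flatten)).2 := by
  have hcount := PySem.List.foldl_pyRange_pyGetD nums (0 : Int)
    (fun c x => c.set (dg e x).toNat (PySem.List.pyGetD c (dg e x) 0 + 1))
    (List.replicate 10 (0 : Int)) (le_refl 0)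
  simp only [PySem.List.len_eq, Int.toNat_zero, List.drop_zero] at hcount
  have hsplit := PySem.List.foldl_prod_mk
    (fun c i => c.set (dg e (PySem.List.pyGetD nums i 0)).toNat
      (PySem.List.pyGetD c (dg e (PySem.List.pyGetD nums i 0)) 0 + 1))
    (fun ys i => ys ++ [(nums, i, -1, ((0 : Int), (0 : Int)))])
    (PySem.List.pyRange 0 (nums.length : Int)) (List.replicate 10 (0 : Int))
    ([] : List (List Int × Int × Int × (Int × Int)))
  simp only [counting_sort_gen_py]
  rw [hsplit]
  rw [PySem.List.foldl_append_singleton_eq_map (fun i => (nums, i, -1, ((0 : Int), (0 : Int))))]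
  rw [hcount, outputA_eq nums e]
  simp

theorem portB_eq (nums : List Int) (e : Int) :
    counting_sort_gen_py_alt nums e
      = ((PySem.List.pyRange 0 (nums.length : Int)).map (fun i => (nums, i, -1, ((0 : Int), (0 : Int)))))
        ++ (csPhase2 nums (((List.range 10).map (bktf e nums)).flatten)).2 := by
  have hbucket := PySem.List.foldl_pyRange_pyGetD nums (0 : Int)
    (fun b x => b.set (dg e x).toNat (PySem.List.pyGetD b (dg e x) [] ++ [x]))
    (List.replicate 10 ([] : List Int)) (le_refl 0)
  simp only [PySem.List.len_eq, Int.toNat_zero, List.drop_zero] at hbucket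
  have hsplit := PySem.List.foldl_prod_mk
    (fun b i => b.set (dg e (PySem.List.pyGetD nums i 0)).toNat
      (PySem.List.pyGetD b (dg e (PySem.List.pyGetD nums i 0)) [] ++ [PySem.List.pyGetD nums i 0]))
    (fun ys i => ys ++ [(nums, i, -1, ((0 : Int), (0 : Int)))])
    (PySem.List.pyRange 0 (nums.length : Int)) (List.replicate 10 ([] : List Int))
    ([] : List (List Int × Int × Int × (Int × Int)))
  simp only [counting_sort_gen_py_alt]
  rw [hsplit]
  rw [PySem.List.foldl_append_singleton_eq_map (fun i => (nums, i, -1, ((0 : Int), (0 : Int))))]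
  rw [hbucket, bucketsB_eq nums e]
  simp

-- ===== VERDICT (by name: the statement is the Claim_ definition above) =====
theorem counting_sort_gen_py_spec : Claim_equal_counting_sort_gen_py := by
  intro nums e _ _
  unfold Spec_counting_sort_gen_py
  rw [portA_eq nums e, portB_eq nums e]
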